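-- pv_equiv track=rewrite | github.com/legaldomain/CSE-221---Algorithm | task1.py | minDP
-- ===== SOURCE A (Python) =====
-- def minDP(n):
--     if not n>= 0 and n<=999:
--         return - 1
--
--     arr = [10**9 for i in range(n+1)]
--
--     arr[0]= 0
--
--     for i in range(n+1): #nested loop
--         for j in str(i):
--             arr[i] = min(arr[i],arr[i-int(j)] + 1)
--
--     return arr[n]
-- ===== SOURCE B (Python) =====
-- def minDP(n):
--     # Greedy: repeatedly subtract the largest decimal digit of the current value.
--     if n < 0:
--         return -1
--     steps = 0
--     while n > 0:
--         m, d = n, 0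
--         while m > 0:
--             if m % 10 > d:
--                 d = m % 10
--             m //= 10
--         n -= d
--         steps += 1
--     return steps
-- ===== Notes on version B (the rewrite author's own statement) =====
-- stated objective: faster
-- what changed: Replaces the bottom-up DP table over all values up to n (one string conversion and relaxation per cell) with the provably optimal greedy that repeatedly subtracts the largest decimal digit, using constant memory and far fewer arithmetic-only iterations.
import Mathlib
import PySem

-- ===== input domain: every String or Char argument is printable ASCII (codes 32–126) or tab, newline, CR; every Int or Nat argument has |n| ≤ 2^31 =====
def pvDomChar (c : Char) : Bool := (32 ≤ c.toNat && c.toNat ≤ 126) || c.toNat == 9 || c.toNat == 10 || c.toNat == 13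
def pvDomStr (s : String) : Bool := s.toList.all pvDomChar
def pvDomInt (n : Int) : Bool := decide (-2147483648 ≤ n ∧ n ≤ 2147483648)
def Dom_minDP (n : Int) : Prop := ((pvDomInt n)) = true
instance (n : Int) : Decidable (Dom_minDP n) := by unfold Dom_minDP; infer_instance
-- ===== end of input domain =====

-- B replaces A's O(n)-memory bottom-up DP table with the provably optimal greedy that
-- repeatedly subtracts the largest decimal digit (objective: faster, constant-factor).

-- ===== PORT A =====
def minDP (n : Int) : Int :=
  if (¬ (n ≥ 0)) ∧ n ≤ 999 then -1
  else
    let arr0 : Array Int := ((PySem.List.pyRange 0 (n + 1) 1).map (fun _ => (10 : Int) ^ 9)).toArray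
    -- arr[0] = 0  (a Python list is an array; the index is always in range here)
    let arr1 : Array Int := arr0.setIfInBounds 0 0
    let arr2 : Array Int := (PySem.List.pyRange 0 (n + 1) 1).foldl
      (fun arr i =>
        ((PySem.Int.toStr i).toList).foldl
          (fun arr c =>
            -- int(j): every char of str(i) for i ≥ 0 is a decimal digit, so ofStr? is always `some`
            let j : Int := (PySem.Int.ofStr? (String.ofList [c])).getD 0
            -- arr[i] = min(arr[i], arr[i-int(j)] + 1): both indices are provably in [0, i] here,
            -- so plain Nat indexing (toNat, getD, setIfInBounds) is exact for this Python
            arr.setIfInBounds i.toNat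
              (min (arr.getD i.toNat 0) (arr.getD (i - j).toNat 0 + 1)))
          arr)
      arr1
    arr2.getD n.toNat 0

-- ===== PORT B =====
-- inner while loop of Source B: scan the decimal digits of m, keeping the largest seen so far in d
def maxDigitAux (m d : Nat) : Nat :=
  if h : m = 0 then d
  else maxDigitAux (m / 10) (if m % 10 > d then m % 10 else d)
decreasing_by exact Nat.div_lt_self (Nat.pos_of_ne_zero h) (by norm_num)

-- termination of the outer while loop: the subtracted digit is positive
theorem maxDigitAux_pos (m d : Nat) (h : 0 < m ∨ 0 < d) : 0 < maxDigitAux m d := by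
  induction m, d using maxDigitAux.induct with
  | case1 d => rw [maxDigitAux]; simpa using h.resolve_left (by omega)
  | case2 m d hm ih =>
    rw [maxDigitAux]
    simp only [hm, dite_false]
    apply ih
    rcases Nat.eq_zero_or_pos (m % 10) with h0 | h0
    · left; omega
    · right; split <;> omega

-- outer while loop of Source B: subtract the largest digit, counting steps
def greedySteps (m : Nat) : Nat :=
  if h : m = 0 then 0
  else greedySteps (m - maxDigitAux m 0) + 1
decreasing_by
  have := maxDigitAux_pos m 0 (Or.inl (Nat.pos_of_ne_zero h))
  omega

def minDP_alt (n : Int) : Int :=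
  if n < 0 then -1 else (greedySteps n.toNat : Int)

-- ===== PRECONDITION & SPEC =====
def Spec_minDP (n : Int) (out : Int) : Prop := out = minDP_alt n
instance (n : Int) (out : Int) : Decidable (Spec_minDP n out) := by unfold Spec_minDP; infer_instance

-- ===== CLAIM (what is proved, stated in full; the proofs are below) =====
def Claim_equal_minDP : Prop := ∀ (n : Int), Dom_minDP n → Spec_minDP n (minDP n)

-- ===== LEMMAS AND PROOFS =====


-- ----- unfolding equations -----

theorem md_zero (d : Nat) : maxDigitAux 0 d = d := by rw [maxDigitAux]; simp

theorem md_step (m d : Nat) (h : m ≠ 0) :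
    maxDigitAux m d = maxDigitAux (m / 10) (if m % 10 > d then m % 10 else d) := by
  rw [maxDigitAux]; simp [h]

def listDigits (m : Nat) : List Nat :=
  if h : m / 10 = 0 then [m % 10]
  else listDigits (m / 10) ++ [m % 10]
decreasing_by exact Nat.div_lt_self (by omega) (by norm_num)

theorem ld_low (m : Nat) (h : m / 10 = 0) : listDigits m = [m % 10] := by
  rw [listDigits]; simp [h]

theorem ld_high (m : Nat) (h : m / 10 ≠ 0) : listDigits m = listDigits (m / 10) ++ [m % 10] := by
  rw [listDigits]; simp [h]

-- ----- facts about maxDigitAux (the digit-scan loop) -----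

theorem md_le_arg (m : Nat) : ∀ (d : Nat), d ≤ maxDigitAux m d := by
  induction m using Nat.strong_induction_on with
  | _ m ih =>
    intro d
    by_cases hm : m = 0
    · subst hm; rw [md_zero]
    · have hlt : m / 10 < m := Nat.div_lt_self (Nat.pos_of_ne_zero hm) (by norm_num)
      rw [md_step m d hm]
      refine le_trans ?_ (ih _ hlt _)
      split <;> omega

theorem md_le_max9 (m : Nat) : ∀ (d : Nat), maxDigitAux m d ≤ max d 9 := by
  induction m using Nat.strong_induction_on with
  | _ m ih =>
    intro d
    by_cases hm : m = 0
    · subst hm; rw [md_zero]; exact le_max_left _ _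
    · have hlt : m / 10 < m := Nat.div_lt_self (Nat.pos_of_ne_zero hm) (by norm_num)
      rw [md_step m d hm]
      refine le_trans (ih _ hlt _) ?_
      have := Nat.mod_lt m (y := 10) (by norm_num)
      split <;> omega

theorem md_mod_le (m d : Nat) : m % 10 ≤ maxDigitAux m d := by
  by_cases hm : m = 0
  · subst hm; rw [md_zero]; omega
  · rw [md_step m d hm]
    refine le_trans ?_ (md_le_arg _ _)
    split <;> omega

theorem md_le_self (m : Nat) : ∀ (d : Nat), maxDigitAux m d ≤ max d m := by
  induction m using Nat.strong_induction_on with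
  | _ m ih =>
    intro d
    by_cases hm : m = 0
    · subst hm; rw [md_zero]; exact le_max_left _ _
    · have hlt : m / 10 < m := Nat.div_lt_self (Nat.pos_of_ne_zero hm) (by norm_num)
      rw [md_step m d hm]
      refine le_trans (ih _ hlt _) ?_
      have h1 : m % 10 ≤ m := Nat.mod_le _ _
      have h2 : m / 10 ≤ m := Nat.div_le_self _ _
      split <;> omega

theorem md_mono (m : Nat) : ∀ {a b : Nat}, a ≤ b → maxDigitAux m a ≤ maxDigitAux m b := by
  induction m using Nat.strong_induction_on with
  | _ m ih =>
    intro a b hab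
    by_cases hm : m = 0
    · subst hm; rw [md_zero, md_zero]; exact hab
    · have hlt : m / 10 < m := Nat.div_lt_self (Nat.pos_of_ne_zero hm) (by norm_num)
      rw [md_step m a hm, md_step m b hm]
      exact ih _ hlt (by split <;> split <;> omega)

theorem md_le_max_zero (m : Nat) : ∀ (a : Nat), maxDigitAux m a ≤ max a (maxDigitAux m 0) := by
  induction m using Nat.strong_induction_on with
  | _ m ih =>
    intro a
    by_cases hm : m = 0
    · subst hm; rw [md_zero]; exact le_max_left _ _
    · have hlt : m / 10 < m := Nat.div_lt_self (Nat.pos_of_ne_zero hm) (by norm_num)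
      by_cases hr : m % 10 > a
      · have h0 : 0 < m % 10 := by omega
        rw [md_step m a hm, md_step m 0 hm, if_pos hr, if_pos (by omega)]
        exact le_max_right _ _
      · rw [md_step m a hm, if_neg hr]
        refine le_trans (ih _ hlt a) (max_le_max_left _ ?_)
        rw [md_step m 0 hm]
        exact md_mono _ (by split <;> omega)

-- decrementing a positive number lowers its largest digit by at most one
theorem md_pred (m : Nat) (h : 0 < m) : maxDigitAux m 0 ≤ maxDigitAux (m - 1) 0 + 1 := by
  by_cases hr : m % 10 = 0
  · -- m = 10*q with q > 0; m-1 ends in 9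
    have hq : m / 10 ≠ 0 := by omega
    have h9 : (m - 1) % 10 = 9 := by omega
    have hm1 : m - 1 ≠ 0 := by omega
    have h1 : maxDigitAux m 0 ≤ 9 := by
      have := md_le_max9 m 0; omega
    have h2 : 9 ≤ maxDigitAux (m - 1) 0 := by
      rw [md_step _ _ hm1, if_pos (by omega)]
      rw [h9]
      exact md_le_arg _ _
    omega
  · -- last digit r > 0 becomes r-1, other digits unchanged
    have hq : (m - 1) / 10 = m / 10 := by omega
    have hr1 : (m - 1) % 10 = m % 10 - 1 := by omega
    have e1 : maxDigitAux m 0 = maxDigitAux (m / 10) (m % 10) := by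
      rw [md_step m 0 (by omega), if_pos (by omega)]
    by_cases hm1 : m - 1 = 0
    · -- m = 1
      have hm : m = 1 := by omega
      subst hm
      rw [md_zero]
      have h11 : maxDigitAux 1 0 = 1 := by
        rw [md_step 1 0 (by norm_num)]
        norm_num
        rw [md_zero]
      omega
    · have e2 : maxDigitAux (m - 1) 0 = maxDigitAux (m / 10) (if m % 10 - 1 > 0 then m % 10 - 1 else 0) := by
        rw [md_step _ _ hm1, hq, hr1]
      rw [e1, e2]
      have hA : maxDigitAux (m / 10) (m % 10) ≤ max (m % 10) (maxDigitAux (m / 10) 0) :=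
        md_le_max_zero _ _
      have hB : maxDigitAux (m / 10) 0 ≤ maxDigitAux (m / 10) (if m % 10 - 1 > 0 then m % 10 - 1 else 0) :=
        md_mono _ (by split <;> omega)
      have hC : m % 10 - 1 ≤ maxDigitAux (m / 10) (if m % 10 - 1 > 0 then m % 10 - 1 else 0) := by
        refine le_trans ?_ (md_le_arg _ _)
        split <;> omega
      omega

-- ----- the digit values of the decimal representation -----

theorem mod_mem_listDigits (m : Nat) : m % 10 ∈ listDigits m := by
  by_cases h : m / 10 = 0
  · rw [ld_low m h]; simp
  · rw [ld_high m h]; simp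

theorem listDigits_lt10 (m : Nat) : ∀ d ∈ listDigits m, d < 10 := by
  induction m using Nat.strong_induction_on with
  | _ m ih =>
    intro d hd
    by_cases h : m / 10 = 0
    · rw [ld_low m h] at hd; simp at hd; omega
    · rw [ld_high m h] at hd
      rcases List.mem_append.mp hd with h' | h'
      · exact ih _ (Nat.div_lt_self (by omega) (by norm_num)) d h'
      · simp at h'; omega

theorem listDigits_le_self (m : Nat) : ∀ d ∈ listDigits m, d ≤ m := by
  induction m using Nat.strong_induction_on with
  | _ m ih =>
    intro d hd
    by_cases h : m / 10 = 0
    · rw [ld_low m h] at hd; simp at hd; subst hd; exact Nat.mod_le _ _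
    · rw [ld_high m h] at hd
      rcases List.mem_append.mp hd with h' | h'
      · exact le_trans (ih _ (Nat.div_lt_self (by omega) (by norm_num)) d h') (Nat.div_le_self _ _)
      · simp at h'; subst h'; exact Nat.mod_le _ _

theorem listDigits_le_md (m : Nat) : ∀ (a : Nat), ∀ d ∈ listDigits m, d ≤ maxDigitAux m a := by
  induction m using Nat.strong_induction_on with
  | _ m ih =>
    intro a d hd
    by_cases h : m / 10 = 0
    · rw [ld_low m h] at hd; simp at hd; subst hd; exact md_mod_le _ _
    · have hm0 : m ≠ 0 := by intro h'; subst h'; simp at h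
      rw [ld_high m h] at hd
      rcases List.mem_append.mp hd with h' | h'
      · rw [md_step m a hm0]
        exact ih _ (Nat.div_lt_self (by omega) (by norm_num)) _ d h'
      · simp at h'; subst h'; exact md_mod_le _ _

theorem md_mem_or (m : Nat) : ∀ (a : Nat), maxDigitAux m a ∈ listDigits m ∨ maxDigitAux m a = a := by
  induction m using Nat.strong_induction_on with
  | _ m ih =>
    intro a
    by_cases hm0 : m = 0
    · subst hm0; right; rw [md_zero]
    · rw [md_step m a hm0]
      by_cases h : m / 10 = 0
      · have hlow : maxDigitAux (m / 10) (if m % 10 > a then m % 10 else a)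
            = (if m % 10 > a then m % 10 else a) := by rw [h, md_zero]
        rw [hlow, ld_low m h]
        split
        · left; simp
        · right; rfl
      · rw [ld_high m h]
        rcases ih _ (Nat.div_lt_self (Nat.pos_of_ne_zero hm0) (show 1 < 10 by norm_num)) (if m % 10 > a then m % 10 else a) with h' | h'
        · left; exact List.mem_append_left _ h'
        · rw [h']; split
          · left; simp
          · right; rfl

theorem md_mem (m : Nat) : maxDigitAux m 0 ∈ listDigits m := by
  rcases md_mem_or m 0 with h | h
  · exact h
  · have h1 := md_mod_le m 0
    rw [h] at h1 ⊢
    have h2 : m % 10 = 0 := by omega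
    have h3 := mod_mem_listDigits m
    rwa [h2] at h3

-- ----- Nat.toDigits bridge: str(i) is the digit list -----

theorem toDigitsCore_eq (f : Nat) : ∀ (n : Nat) (ds : List Char), n < f →
    Nat.toDigitsCore 10 f n ds = (listDigits n).map Nat.digitChar ++ ds := by
  induction f with
  | zero => intro n ds h; omega
  | succ f ih =>
    intro n ds h
    rw [Nat.toDigitsCore]
    by_cases h0 : n / 10 = 0
    · rw [ld_low n h0]; simp [h0]
    · rw [ld_high n h0]
      simp only [h0, if_false]
      rw [ih _ _ (by have := Nat.div_lt_self (show 0 < n by omega) (show 1 < 10 by norm_num); omega)]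
      simp

theorem toChars_eq (m : Nat) : PySem.Int.toChars (m : Int) = (listDigits m).map Nat.digitChar := by
  show (if (m : Int) < 0 then _ else _) = _
  rw [if_neg (by omega)]
  have h : ((m : Int)).toNat = m := by omega
  rw [h]
  show Nat.toDigitsCore 10 (m + 1) m [] = _
  rw [toDigitsCore_eq _ _ _ (by omega)]
  simp

-- int(c) for a digit char
theorem ofStr?_digitChar (d : Nat) (hd : d < 10) :
    PySem.Int.ofStr? (String.ofList [Nat.digitChar d]) = some (d : Int) := by
  interval_cases d <;> decide

-- ----- greedy step count: equations, monotonicity, size bound -----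

theorem g_zero : greedySteps 0 = 0 := by rw [greedySteps]; simp

theorem g_succ (m : Nat) (h : m ≠ 0) :
    greedySteps m = greedySteps (m - maxDigitAux m 0) + 1 := by
  rw [greedySteps]; simp [h]

theorem g_mono : ∀ (n m : Nat), m ≤ n → greedySteps m ≤ greedySteps n := by
  intro n
  induction n using Nat.strong_induction_on with
  | _ n ih =>
    intro m hmn
    rcases Nat.eq_or_lt_of_le hmn with h | h
    · subst h; exact le_refl _
    · have hn : n ≠ 0 := by omega
      have key : greedySteps (n - 1) ≤ greedySteps n := by
        by_cases h1 : n - 1 = 0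
        · rw [h1, g_zero]; omega
        · have hM : 0 < maxDigitAux n 0 := maxDigitAux_pos n 0 (Or.inl (by omega))
          have hMn : maxDigitAux n 0 ≤ n := by have := md_le_self n 0; omega
          have hM' : 0 < maxDigitAux (n - 1) 0 := maxDigitAux_pos (n - 1) 0 (Or.inl (by omega))
          have hM'n : maxDigitAux (n - 1) 0 ≤ n - 1 := by have := md_le_self (n - 1) 0; omega
          have hpred : maxDigitAux n 0 ≤ maxDigitAux (n - 1) 0 + 1 := md_pred n (by omega)
          rw [g_succ n hn, g_succ (n - 1) h1]
          have hle : n - 1 - maxDigitAux (n - 1) 0 ≤ n - maxDigitAux n 0 := by omega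
          have := ih (n - maxDigitAux n 0) (by omega) _ hle
          omega
      calc greedySteps m ≤ greedySteps (n - 1) := ih (n - 1) (by omega) m (by omega)
        _ ≤ greedySteps n := key

theorem g_bound' : ∀ (m : Nat), greedySteps m ≤ 2 * (m / 10) + (if m % 10 = 0 then 1 else 2) := by
  intro m
  induction m using Nat.strong_induction_on with
  | _ m ih =>
    by_cases hm : m = 0
    · subst hm; rw [g_zero]; simp
    · have hM : 0 < maxDigitAux m 0 := maxDigitAux_pos m 0 (Or.inl (by omega))
      have hM9 : maxDigitAux m 0 ≤ 9 := by have := md_le_max9 m 0; omega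
      have hMm : maxDigitAux m 0 ≤ m := by have := md_le_self m 0; omega
      have hMr : m % 10 ≤ maxDigitAux m 0 := md_mod_le m 0
      rw [g_succ m hm]
      have ih' := ih (m - maxDigitAux m 0) (by omega)
      by_cases hsmall : m < 10
      · have hMeq : maxDigitAux m 0 = m := by omega
        rw [hMeq, Nat.sub_self, g_zero]
        have hr : ¬ (m % 10 = 0) := by omega
        simp [hr]
      · by_cases hr : m % 10 = 0
        · have hb : greedySteps (m - maxDigitAux m 0) ≤ 2 * ((m - maxDigitAux m 0) / 10) + 2 := by
            split at ih' <;> omega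
          simp only [hr, if_true]
          omega
        · by_cases hq : (m - maxDigitAux m 0) / 10 = m / 10
          · have hr0 : (m - maxDigitAux m 0) % 10 = 0 := by omega
            rw [hr0] at ih'; simp only [if_true] at ih'
            simp only [hr, if_false]
            omega
          · have hle : (m - maxDigitAux m 0) / 10 ≤ m / 10 := Nat.div_le_div_right (by omega)
            have hb : greedySteps (m - maxDigitAux m 0) ≤ 2 * ((m - maxDigitAux m 0) / 10) + 2 := by
              split at ih' <;> omega
            simp only [hr, if_false]
            omega

theorem g_bound (m : Nat) : greedySteps m ≤ 2 * (m / 10) + 2 := by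
  have := g_bound' m
  split at this <;> omega


-- ----- the value computed at one DP cell, as a function of digit list and lookups -----

def innerF (look : Nat → Int) : List Nat → Int → Int
  | [], v => v
  | d :: ds, v => innerF look ds (min v ((if d = 0 then v else look d) + 1))

theorem innerF_le (look : Nat → Int) : ∀ (ds : List Nat) (v : Int), innerF look ds v ≤ v := by
  intro ds
  induction ds with
  | nil => intro v; exact le_refl _
  | cons d ds ih =>
    intro v
    refine le_trans (ih _) ?_
    exact min_le_left _ _

theorem innerF_lb (look : Nat → Int) (t : Int) :
    ∀ (ds : List Nat), (∀ d ∈ ds, d ≠ 0 → t ≤ look d + 1) →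
    ∀ (v : Int), t ≤ v → t ≤ innerF look ds v := by
  intro ds
  induction ds with
  | nil => intro _ v hv; exact hv
  | cons d ds ih =>
    intro h v hv
    refine ih (fun d hd => h d (List.mem_cons_of_mem _ hd)) _ ?_
    by_cases hd0 : d = 0
    · simp only [hd0, if_true]; omega
    · have := h d (List.mem_cons_self) hd0
      simp only [hd0, if_false]; omega

theorem innerF_ub (look : Nat → Int) :
    ∀ (ds : List Nat) (v : Int) (d : Nat), d ∈ ds → d ≠ 0 → innerF look ds v ≤ look d + 1 := by
  intro ds
  induction ds with
  | nil => intro v d hd; simp at hd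
  | cons e ds ih =>
    intro v d hd hd0
    rcases List.mem_cons.mp hd with h | h
    · subst h
      simp only [innerF]
      refine le_trans (innerF_le _ _ _) ?_
      rw [if_neg hd0]
      exact min_le_right _ _
    · exact ih _ d h hd0

-- ----- Array/List bridges -----

theorem agetD (a : Array Int) (i : Nat) (d : Int) : a.getD i d = a.toList.getD i d := by
  simp [Array.getD, List.getD]
  split
  · rw [Array.getElem?_eq_getElem ‹_›]; rfl
  · rw [Array.getElem?_eq_none (by omega)]; rfl

theorem foldl_toList {α β : Type} (fA : Array α → β → Array α) (fL : List α → β → List α)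
    (h : ∀ a x, (fA a x).toList = fL a.toList x) :
    ∀ (l : List β) (a : Array α), (l.foldl fA a).toList = l.foldl fL a.toList := by
  intro l
  induction l with
  | nil => intro a; rfl
  | cons x l ih => intro a; rw [List.foldl_cons, List.foldl_cons, ih, h]

theorem getD_set (xs : List Int) (n k : Nat) (v : Int) (hn : n < xs.length) :
    (xs.set n v).getD k 0 = if k = n then v else xs.getD k 0 := by
  rw [List.getD_eq_getElem?_getD, List.getD_eq_getElem?_getD, List.getElem?_set]
  by_cases hk : k = n
  · rw [if_pos hk, if_pos hk.symm, if_pos (by omega)]; rfl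
  · rw [if_neg hk, if_neg (fun h => hk h.symm)]

-- the inner Python loop only rewrites cell m; it computes innerF of the old row
theorem inner_fold_eq (A : List Int) (m : Nat) (hm : m < A.length) :
    ∀ (ds : List Nat) (v : Int), (∀ d ∈ ds, d ≤ m) →
    ds.foldl (fun a d => a.set m (min (a.getD m 0) (a.getD (m - d) 0 + 1))) (A.set m v)
    = A.set m (innerF (fun d => A.getD (m - d) 0) ds v) := by
  intro ds
  induction ds with
  | nil => intro v _; rfl
  | cons d ds ih =>
    intro v hds
    have hdm : d ≤ m := hds d List.mem_cons_self
    rw [List.foldl_cons]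
    have hget1 : (A.set m v).getD m 0 = v := by
      rw [getD_set A m m v hm, if_pos rfl]
    have hget2 : (A.set m v).getD (m - d) 0
        = if d = 0 then v else A.getD (m - d) 0 := by
      rw [getD_set A m (m - d) v hm]
      by_cases hd0 : d = 0
      · rw [if_pos (by omega), if_pos hd0]
      · by_cases hmd : m = 0
        · omega
        · rw [if_neg (by omega), if_neg hd0]
    rw [hget1, hget2, List.set_set, ih _ (fun e he => hds e (List.mem_cons_of_mem _ he))]
    rfl

-- ----- the DP row after the first m outer iterations -----

def modelArr (nn m : Nat) : List Int :=
  (List.range (nn + 1)).map (fun k => if k < m ∨ k = 0 then (greedySteps k : Int) else 10 ^ 9)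

theorem modelArr_length (nn m : Nat) : (modelArr nn m).length = nn + 1 := by
  simp [modelArr]

theorem modelArr_get (nn m k : Nat) (hk : k ≤ nn) :
    (modelArr nn m).getD k 0
      = if k < m ∨ k = 0 then (greedySteps k : Int) else 10 ^ 9 := by
  rw [List.getD_eq_getElem?_getD]
  rw [List.getElem?_eq_getElem (by simp [modelArr]; omega)]
  simp [modelArr]

-- one outer iteration takes row m to row m+1
theorem outer_step (nn m : Nat) (hm : m ≤ nn) (hnn : nn ≤ 2147483648) :
    (listDigits m).foldl (fun a d => a.set m (min (a.getD m 0) (a.getD (m - d) 0 + 1)))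
      (modelArr nn m)
    = modelArr nn (m + 1) := by
  have hmlen : m < (modelArr nn m).length := by rw [modelArr_length]; omega
  have hv0 : (modelArr nn m).getD m 0 = if m = 0 then 0 else 10 ^ 9 := by
    rw [modelArr_get nn m m hm]
    by_cases hm0 : m = 0
    · simp [hm0, g_zero]
    · rw [if_neg (by omega), if_neg hm0]
  have hstart : modelArr nn m = (modelArr nn m).set m ((modelArr nn m).getD m 0) := by
    rw [List.getD_eq_getElem?_getD, List.getElem?_eq_getElem hmlen]
    simp [List.set_getElem_self]
  conv_lhs => rw [hstart]
  rw [inner_fold_eq (modelArr nn m) m hmlen (listDigits m)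
        ((modelArr nn m).getD m 0)
        (fun d hd => listDigits_le_self m d hd)]
  -- the innerF value is exactly greedySteps m
  have hval : innerF (fun d => (modelArr nn m).getD (m - d) 0)
        (listDigits m) ((modelArr nn m).getD m 0)
      = (greedySteps m : Int) := by
    have hlook : ∀ d ∈ listDigits m, d ≠ 0 →
        (modelArr nn m).getD (m - d) 0 = (greedySteps (m - d) : Int) := by
      intro d hd hd0
      have hdm : d ≤ m := listDigits_le_self m d hd
      rw [modelArr_get nn m (m - d) (by omega)]
      rw [if_pos (Or.inl (by omega))]
    by_cases hm0 : m = 0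
    · subst hm0
      rw [ld_low 0 (by norm_num)]
      show innerF _ [0 % 10] _ = _
      rw [hv0]
      simp [innerF, g_zero]
    · set M := maxDigitAux m 0 with hMdef
      have hM : 0 < M := maxDigitAux_pos m 0 (Or.inl (by omega))
      have hMm : M ≤ m := by have := md_le_self m 0; omega
      have hMmem : M ∈ listDigits m := md_mem m
      have hgs := g_succ m hm0
      rw [← hMdef] at hgs
      apply le_antisymm
      · refine le_trans (innerF_ub _ _ _ M hMmem (by omega)) ?_
        rw [hlook M hMmem (by omega)]
        rw [hgs]; push_cast; omega
      · apply innerF_lb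
        · intro d hd hd0
          rw [hlook d hd hd0]
          have hdM : d ≤ M := listDigits_le_md m 0 d hd
          have hmono : greedySteps (m - M) ≤ greedySteps (m - d) := g_mono _ _ (by omega)
          rw [hgs]; push_cast; omega
        · rw [hv0, if_neg hm0]
          have hb := g_bound m
          have hdiv : m / 10 ≤ 214748364 := by omega
          have : (greedySteps m : Int) ≤ 2 * 214748364 + 2 := by push_cast; omega
          omega
  rw [hval]
  -- writing greedySteps m into cell m gives row m+1
  apply List.ext_getElem
  · simp [modelArr]
  · intro k h1 h2
    have hk : k ≤ nn := by simp [modelArr] at h2; omega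
    rw [List.getElem_set]
    simp only [modelArr, List.getElem_map, List.getElem_range]
    by_cases hkm : m = k
    · subst hkm
      rw [if_pos rfl, if_pos (Or.inl (by omega))]
    · rw [if_neg hkm]
      by_cases hcond : k < m ∨ k = 0
      · rw [if_pos hcond, if_pos (by omega)]
      · rw [if_neg hcond, if_neg (by omega)]

-- str(i) drives the same fold as the digit list
theorem inner_chars_to_digits (arr : List Int) (m : Nat) :
    ((PySem.Int.toStr ((m : Nat) : Int)).toList).foldl
      (fun a c =>
        let j : Int := (PySem.Int.ofStr? (String.ofList [c])).getD 0
        a.set (((m : Nat) : Int)).toNat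
          (min (a.getD (((m : Nat) : Int)).toNat 0)
               (a.getD ((((m : Nat) : Int)) - j).toNat 0 + 1))) arr
    = (listDigits m).foldl (fun a d => a.set m (min (a.getD m 0) (a.getD (m - d) 0 + 1))) arr := by
  rw [PySem.Int.toList_toStr, toChars_eq, List.foldl_map]
  apply PySem.List.foldl_congr_mem
  intro acc d hd
  have hlt := listDigits_lt10 m d hd
  have hdm : d ≤ m := listDigits_le_self m d hd
  simp only [ofStr?_digitChar d hlt, Option.getD_some]
  rw [show ((((m : Nat) : Int)) - ((d : Nat) : Int)).toNat = m - d by omega,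
      show (((m : Nat) : Int)).toNat = m by omega]

-- the whole outer loop, by induction on the number of processed cells
theorem outer_fold (nn : Nat) (hnn : nn ≤ 2147483648) :
    ∀ (m : Nat), m ≤ nn + 1 →
    (PySem.List.pyRange 0 ((m : Nat) : Int) 1).foldl
      (fun arr i =>
        ((PySem.Int.toStr i).toList).foldl
          (fun a c =>
            let j : Int := (PySem.Int.ofStr? (String.ofList [c])).getD 0
            a.set i.toNat
              (min (a.getD i.toNat 0) (a.getD (i - j).toNat 0 + 1)))
          arr)
      (modelArr nn 0)
    = modelArr nn m := by
  intro m
  induction m with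
  | zero =>
    intro _
    rw [show ((0 : Nat) : Int) = 0 by norm_num, PySem.List.pyRange_one_eq_nil (le_refl 0)]
    rfl
  | succ m ih =>
    intro hm
    have hcast : (((m + 1 : Nat)) : Int) = ((m : Nat) : Int) + 1 := by push_cast; ring
    rw [hcast, PySem.List.pyRange_one_succ_right (by positivity), List.foldl_append,
        ih (by omega)]
    simp only [List.foldl_cons, List.foldl_nil]
    rw [inner_chars_to_digits (modelArr nn m) m]
    exact outer_step nn m (by omega) hnn

-- ===== VERDICT (by name: the statement is the Claim_ definition above) =====
theorem minDP_spec : Claim_equal_minDP := by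
  intro n hdom
  unfold Spec_minDP
  by_cases hneg : n < 0
  · simp only [minDP, minDP_alt]
    rw [if_pos ⟨by omega, by omega⟩, if_pos hneg]
  · have h0 : 0 ≤ n := by omega
    have hdom' : n ≤ 2147483648 := by
      unfold Dom_minDP pvDomInt at hdom
      simp only [decide_eq_true_eq] at hdom
      omega
    have hnn : (n.toNat : Int) = n := by omega
    have hnn' : n.toNat ≤ 2147483648 := by omega
    simp only [minDP, minDP_alt]
    rw [if_neg (by omega), if_neg (by omega)]
    rw [agetD]
    rw [foldl_toList _ (fun arr (i : Int) =>
        ((PySem.Int.toStr i).toList).foldl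
          (fun a c =>
            let j : Int := (PySem.Int.ofStr? (String.ofList [c])).getD 0
            a.set i.toNat
              (min (a.getD i.toNat 0) (a.getD (i - j).toNat 0 + 1)))
          arr)
      (by
        intro a i
        exact foldl_toList _ _ (by
          intro a' c
          rw [Array.toList_setIfInBounds, agetD, agetD]) _ a) _ _]
    rw [Array.toList_setIfInBounds, List.toList_toArray]
    have hinit : (((PySem.List.pyRange 0 (n + 1) 1).map (fun _ => (10 : Int) ^ 9)).set 0 0)
        = modelArr n.toNat 0 := by
      apply List.ext_getElem
      · simp [modelArr, PySem.List.pyRange_one]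
        omega
      · intro k h1 h2
        rw [List.getElem_set]
        simp only [modelArr, List.getElem_map, List.getElem_range]
        by_cases hk0 : 0 = k
        · rw [if_pos hk0, if_pos (by omega), ← hk0, g_zero]
          simp
        · rw [if_neg hk0, if_neg (by omega)]
    rw [hinit]
    rw [show n + 1 = ((n.toNat + 1 : Nat) : Int) by omega]
    rw [outer_fold n.toNat hnn' (n.toNat + 1) (le_refl _)]
    rw [modelArr_get n.toNat (n.toNat + 1) n.toNat (le_refl _)]
    rw [if_pos (Or.inl (by omega))]
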